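-- pv_equiv track=rewrite | github.com/vishnutilak/Daily-code-challenge--fCC.org | 21stDec2025/dayLight Hours.py | daylight_hours
-- ===== SOURCE A (Python) =====
-- def daylight_hours(latitude):
--     table = {
--         -90: 24,
--         -75: 23,
--         -60: 21,
--         -45: 15,
--         -30: 13,
--         -15: 12,
--           0: 12,
--          15: 11,
--          30: 10,
--          45: 9,
--          60: 6,
--          75: 2,
--          90: 0
--     }
--     #lat:dayLightH
--
--     closest_lat = 0
--     smallest_diff = float('inf')
-- ##finding the nearest value from the given input
--     for lat in table:
--         diff = abs(latitude - lat)
--         if diff < smallest_diff: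
--             smallest_diff = diff
--             closest_lat = lat
--
--     return table[closest_lat]
-- ===== SOURCE B (Python) =====
-- def daylight_hours(latitude):
--     # Table latitudes are multiples of 15 from -90 to 90: round to the
--     # nearest multiple of 15 and index the ordered hours list directly.
--     hours = [24, 23, 21, 15, 13, 12, 12, 11, 10, 9, 6, 2, 0]
--     k = (2 * latitude + 15) // 30          # nearest multiple of 15, in units of 15 degrees
--     k = max(-6, min(6, k))                 # clamp to the table's range
--     return hours[k + 6]
-- ===== Notes on version B (the rewrite author's own statement) =====
-- stated objective: simpler
-- what changed: Replaces the min-distance scan over the latitude table by a closed-form round-to-nearest-table-latitude floor-division formula with clamping, indexing an ordered hours list, removing the loop and the dict entirely.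
import Mathlib
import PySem

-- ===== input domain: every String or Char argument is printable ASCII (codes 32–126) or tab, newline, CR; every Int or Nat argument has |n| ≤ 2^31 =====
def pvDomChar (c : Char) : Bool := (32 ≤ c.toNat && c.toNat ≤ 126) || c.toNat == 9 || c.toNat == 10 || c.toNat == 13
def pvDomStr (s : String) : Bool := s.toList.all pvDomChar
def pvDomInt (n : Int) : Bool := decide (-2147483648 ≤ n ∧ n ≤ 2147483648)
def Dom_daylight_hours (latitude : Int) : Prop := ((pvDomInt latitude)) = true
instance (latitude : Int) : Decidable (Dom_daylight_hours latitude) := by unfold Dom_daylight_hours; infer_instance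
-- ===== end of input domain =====

-- B replaces A's nearest-key min-scan over the table by rounding to the nearest
-- multiple of 15 degrees and indexing an ordered hours list (objective: simpler).

-- ===== PORT A =====
-- Python's abs on ints
def pvAbs (x : Int) : Int := if x < 0 then -x else x

-- A's table in insertion order (dict latitude -> hours)
def pvTable : List (Int × Int) :=
  [(-90,24),(-75,23),(-60,21),(-45,15),(-30,13),(-15,12),(0,12),
   (15,11),(30,10),(45,9),(60,6),(75,2),(90,0)]

-- the body of A's for-loop; state = (closest_lat, smallest_diff),
-- smallest_diff starts as float('inf'): modelled as Option Int, none = inf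
-- (every finite diff is < inf, exactly Python's first-iteration behaviour)
def pvStep (latitude : Int) (st : Int × Option Int) (kv : Int × Int) : Int × Option Int :=
  let diff := pvAbs (latitude - kv.1)
  match st.2 with
  | none => (kv.1, some diff)
  | some s => if diff < s then (kv.1, some diff) else st

def daylight_hours (latitude : Int) : Int :=
  let st := pvTable.foldl (pvStep latitude) (0, none)
  -- table[closest_lat]: the key is always present, so the lookup never raises;
  -- .getD 0 is never the result
  (PySem.Dict.get? (PySem.Dict.ofList pvTable) st.1).getD 0

-- ===== PORT B =====
def daylight_hours_alt (latitude : Int) : Int :=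
  let hours : List Int := [24, 23, 21, 15, 13, 12, 12, 11, 10, 9, 6, 2, 0]
  let k := PySem.Int.floordiv (2 * latitude + 15) 30
  let k := max (-6) (min 6 k)
  -- hours[k+6]: k+6 ∈ [0,12] always, so the indexing never raises; .getD 0 never the result
  (PySem.List.pyGet? hours (k + 6)).getD 0

-- ===== PRECONDITION & SPEC =====
def Spec_daylight_hours (latitude : Int) (out : Int) : Prop := out = daylight_hours_alt latitude
instance (latitude : Int) (out : Int) : Decidable (Spec_daylight_hours latitude out) := by unfold Spec_daylight_hours; infer_instance

-- ===== CLAIM (what is proved, stated in full; the proofs are below) =====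
def Claim_equal_daylight_hours : Prop := ∀ (latitude : Int), Dom_daylight_hours latitude → Spec_daylight_hours latitude (daylight_hours latitude)

-- ===== LEMMAS AND PROOFS =====

-- a later table entry whose distance is not smaller leaves the state unchanged
lemma pvStep_keep (lat c s k v : Int) (h : ¬ pvAbs (lat - k) < s) :
    pvStep lat (c, some s) (k, v) = (c, some s) := by
  simp [pvStep, h]

-- a later table entry whose distance is smaller replaces the state
lemma pvStep_repl (lat c s k v : Int) (h : pvAbs (lat - k) < s) :
    pvStep lat (c, some s) (k, v) = (k, some (pvAbs (lat - k))) := by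
  simp [pvStep, h]

-- far south: every key after -90 is farther away, so the scan keeps -90
lemma fold_lo (lat : Int) (h : lat ≤ -83) :
    pvTable.foldl (pvStep lat) (0, none) = (-90, some (pvAbs (lat + 90))) := by
  have h0 : pvStep lat (0, none) (-90, 24) = (-90, some (pvAbs (lat + 90))) := by
    simp [pvStep, sub_neg_eq_add]
  simp only [pvTable, List.foldl_cons, List.foldl_nil, h0]
  rw [pvStep_keep lat _ _ (-75) 23 (by simp only [pvAbs]; split_ifs <;> omega)]
  rw [pvStep_keep lat _ _ (-60) 21 (by simp only [pvAbs]; split_ifs <;> omega)]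
  rw [pvStep_keep lat _ _ (-45) 15 (by simp only [pvAbs]; split_ifs <;> omega)]
  rw [pvStep_keep lat _ _ (-30) 13 (by simp only [pvAbs]; split_ifs <;> omega)]
  rw [pvStep_keep lat _ _ (-15) 12 (by simp only [pvAbs]; split_ifs <;> omega)]
  rw [pvStep_keep lat _ _ 0 12 (by simp only [pvAbs]; split_ifs <;> omega)]
  rw [pvStep_keep lat _ _ 15 11 (by simp only [pvAbs]; split_ifs <;> omega)]
  rw [pvStep_keep lat _ _ 30 10 (by simp only [pvAbs]; split_ifs <;> omega)]
  rw [pvStep_keep lat _ _ 45 9 (by simp only [pvAbs]; split_ifs <;> omega)]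
  rw [pvStep_keep lat _ _ 60 6 (by simp only [pvAbs]; split_ifs <;> omega)]
  rw [pvStep_keep lat _ _ 75 2 (by simp only [pvAbs]; split_ifs <;> omega)]
  rw [pvStep_keep lat _ _ 90 0 (by simp only [pvAbs]; split_ifs <;> omega)]

-- far north: every key is strictly closer than the previous one, so the scan ends at 90
lemma fold_hi (lat : Int) (h : 83 ≤ lat) :
    pvTable.foldl (pvStep lat) (0, none) = (90, some (pvAbs (lat - 90))) := by
  have h0 : pvStep lat (0, none) (-90, 24) = (-90, some (pvAbs (lat + 90))) := by
    simp [pvStep, sub_neg_eq_add]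
  simp only [pvTable, List.foldl_cons, List.foldl_nil, h0]
  rw [pvStep_repl lat _ _ (-75) 23 (by simp only [pvAbs]; split_ifs <;> omega)]
  rw [pvStep_repl lat _ _ (-60) 21 (by simp only [pvAbs]; split_ifs <;> omega)]
  rw [pvStep_repl lat _ _ (-45) 15 (by simp only [pvAbs]; split_ifs <;> omega)]
  rw [pvStep_repl lat _ _ (-30) 13 (by simp only [pvAbs]; split_ifs <;> omega)]
  rw [pvStep_repl lat _ _ (-15) 12 (by simp only [pvAbs]; split_ifs <;> omega)]
  rw [pvStep_repl lat _ _ 0 12 (by simp only [pvAbs]; split_ifs <;> omega)]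
  rw [pvStep_repl lat _ _ 15 11 (by simp only [pvAbs]; split_ifs <;> omega)]
  rw [pvStep_repl lat _ _ 30 10 (by simp only [pvAbs]; split_ifs <;> omega)]
  rw [pvStep_repl lat _ _ 45 9 (by simp only [pvAbs]; split_ifs <;> omega)]
  rw [pvStep_repl lat _ _ 60 6 (by simp only [pvAbs]; split_ifs <;> omega)]
  rw [pvStep_repl lat _ _ 75 2 (by simp only [pvAbs]; split_ifs <;> omega)]
  rw [pvStep_repl lat _ _ 90 0 (by simp only [pvAbs]; split_ifs <;> omega)]

lemma lookup_lo : (PySem.Dict.get? (PySem.Dict.ofList pvTable) (-90 : Int)).getD 0 = 24 := by decide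
lemma lookup_hi : (PySem.Dict.get? (PySem.Dict.ofList pvTable) (90 : Int)).getD 0 = 0 := by decide

-- on the far south side both programs are constantly 24
lemma lo_case (lat : Int) (h : lat ≤ -83) :
    daylight_hours lat = 24 ∧ daylight_hours_alt lat = 24 := by
  constructor
  · simp only [daylight_hours, fold_lo lat h]
    exact lookup_lo
  · have h30 : (0:Int) < 30 := by norm_num
    have hk : PySem.Int.floordiv (2 * lat + 15) 30 ≤ -6 := by
      have := (PySem.Int.floordiv_lt_iff_lt_mul (a := 2 * lat + 15) (b := 30) (q := -5) h30).mpr (by omega)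
      omega
    simp only [daylight_hours_alt]
    have hm : max (-6 : Int) (min 6 (PySem.Int.floordiv (2 * lat + 15) 30)) = -6 := by omega
    rw [hm]; decide

-- on the far north side both programs are constantly 0
lemma hi_case (lat : Int) (h : 83 ≤ lat) :
    daylight_hours lat = 0 ∧ daylight_hours_alt lat = 0 := by
  constructor
  · simp only [daylight_hours, fold_hi lat h]
    exact lookup_hi
  · have h30 : (0:Int) < 30 := by norm_num
    have hk : 6 ≤ PySem.Int.floordiv (2 * lat + 15) 30 := by
      have := (PySem.Int.le_floordiv_iff_mul_le (a := 2 * lat + 15) (b := 30) (q := 6) h30).mpr (by omega)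
      omega
    simp only [daylight_hours_alt]
    have hm : max (-6 : Int) (min 6 (PySem.Int.floordiv (2 * lat + 15) 30)) = 6 := by omega
    rw [hm]; decide

set_option maxRecDepth 100000 in
set_option maxHeartbeats 1000000 in
-- the finite middle band, checked exhaustively
lemma mid_range : ∀ n ∈ Finset.range 167, daylight_hours ((n : Int) - 83) = daylight_hours_alt ((n : Int) - 83) := by
  decide

lemma mid_case (lat : Int) (h1 : -83 ≤ lat) (h2 : lat ≤ 83) :
    daylight_hours lat = daylight_hours_alt lat := by
  have hn : lat = ((lat + 83).toNat : Int) - 83 := by omega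
  rw [hn]
  exact mid_range (lat + 83).toNat (Finset.mem_range.mpr (by omega))

-- ===== VERDICT (by name: the statement is the Claim_ definition above) =====
theorem daylight_hours_spec : Claim_equal_daylight_hours := by
  intro lat _
  unfold Spec_daylight_hours
  rcases lt_trichotomy lat (-83) with h | h | h
  · have := lo_case lat (by omega); omega
  · exact mid_case lat (by omega) (by omega)
  · by_cases h2 : lat ≤ 83
    · exact mid_case lat (by omega) h2
    · have := hi_case lat (by omega); omega
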